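-- pv_equiv track=rewrite | github.com/jmd-jude/fpa_toolkit | python/depo_summary.py | build_inverse_map
-- ===== SOURCE A (Python) =====
-- def build_inverse_map(page_map):
--     """
--     Build {pdf_page_0idx: {"first": int, "last": int}} from the page_map.
--     "first" and "last" are the first/last transcript page numbers on that PDF page.
--     """
--     inv = {}
--     for tp, entry in page_map.items():
--         pi = entry["pdf_page"]
--         if pi not in inv:
--             inv[pi] = {"first": tp, "last": tp}
--         else:
--             inv[pi]["first"] = min(inv[pi]["first"], tp)
--             inv[pi]["last"] = max(inv[pi]["last"], tp)
--     return inv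
-- ===== SOURCE B (Python) =====
-- def build_inverse_map(page_map):
--     """
--     Build {pdf_page_0idx: {"first": int, "last": int}} from the page_map.
--     Group-then-aggregate: first collect, per PDF page, the list of transcript
--     pages in iteration order; then reduce each group with min/max.
--     """
--     groups = {}
--     for tp, entry in page_map.items():
--         groups.setdefault(entry["pdf_page"], []).append(tp)
--     return {pi: {"first": min(tps), "last": max(tps)} for pi, tps in groups.items()}
-- ===== Notes on version B (the rewrite author's own statement) =====
-- stated objective: alternative
-- what changed: Replaces A's online running-min/max update with a branch inside the loop by a two-pass group-then-aggregate: one pass builds pdf_page -> list of transcript pages, a second pass reduces each group with min/max in a dict comprehension.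
import Mathlib
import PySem

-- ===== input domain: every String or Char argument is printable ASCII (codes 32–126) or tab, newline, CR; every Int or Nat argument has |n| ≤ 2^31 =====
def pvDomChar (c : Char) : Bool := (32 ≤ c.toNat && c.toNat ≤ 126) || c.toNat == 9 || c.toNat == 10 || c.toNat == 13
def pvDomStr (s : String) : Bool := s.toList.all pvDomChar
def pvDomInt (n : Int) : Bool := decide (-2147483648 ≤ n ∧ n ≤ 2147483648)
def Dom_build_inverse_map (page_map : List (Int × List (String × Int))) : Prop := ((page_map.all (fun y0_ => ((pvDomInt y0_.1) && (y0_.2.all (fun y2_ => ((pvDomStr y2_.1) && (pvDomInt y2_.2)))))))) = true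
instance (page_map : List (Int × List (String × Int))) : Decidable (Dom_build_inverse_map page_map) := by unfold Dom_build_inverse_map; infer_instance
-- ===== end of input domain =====

-- B replaces A's in-loop running-min/max update by a two-pass group-then-aggregate (objective: alternative).

-- ===== PORT A =====
def build_inverse_map (page_map : List (Int × List (String × Int))) : List (Int × List (String × Int)) :=
  (page_map.foldl
    (fun inv p =>
      let pi := (PySem.Dict.mk p.2).getD "pdf_page" 0
      if inv.contains pi = false then
        inv.insert pi (PySem.Dict.mk [("first", p.1), ("last", p.1)])
      else
        let d := inv.getD pi (PySem.Dict.mk [])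
        inv.insert pi ((d.insert "first" (min (d.getD "first" 0) p.1)).insert "last"
          (max (d.getD "last" 0) p.1)))
    (PySem.Dict.empty : PySem.Dict Int (PySem.Dict String Int))).items.map
    (fun q => (q.1, q.2.items))

-- ===== PORT B =====
def build_inverse_map_alt (page_map : List (Int × List (String × Int))) : List (Int × List (String × Int)) :=
  let groups : PySem.Dict Int (List Int) :=
    page_map.foldl
      (fun g p => g.modify ((PySem.Dict.mk p.2).getD "pdf_page" 0) [] (fun l => l ++ [p.1]))
      PySem.Dict.empty
  groups.items.map (fun q =>
    (q.1, [("first", PySem.List.minD q.2 (fun y => y) 0), ("last", PySem.List.maxD q.2 (fun y => y) 0)]))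

-- ===== PRECONDITION & SPEC =====
-- Pre_: every entry dict must contain the key "pdf_page"; otherwise the Python A raises KeyError.
def Pre_build_inverse_map (page_map : List (Int × List (String × Int))) : Prop :=
  ∀ p ∈ page_map, (PySem.Dict.mk p.2).contains "pdf_page" = true
instance (page_map : List (Int × List (String × Int))) : Decidable (Pre_build_inverse_map page_map) := by
  unfold Pre_build_inverse_map; infer_instance
def pvWitness_build_inverse_map : (List (Int × List (String × Int))) :=
  [(1, [("pdf_page", 0)]), (2, [("pdf_page", 0)])]

def Spec_build_inverse_map (page_map : List (Int × List (String × Int))) (out : List (Int × List (String × Int))) : Prop := out = build_inverse_map_alt page_map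
instance (page_map : List (Int × List (String × Int))) (out : List (Int × List (String × Int))) : Decidable (Spec_build_inverse_map page_map out) := by unfold Spec_build_inverse_map; infer_instance

-- ===== CLAIM (what is proved, stated in full; the proofs are below) =====
def Claim_equal_build_inverse_map : Prop := ∀ (page_map : List (Int × List (String × Int))), Dom_build_inverse_map page_map → Pre_build_inverse_map page_map → Spec_build_inverse_map page_map (build_inverse_map page_map)

-- ===== LEMMAS AND PROOFS =====

-- abstraction: B's group (pi, tps) corresponds to A's inner dict {"first": min tps, "last": max tps}
def pvF (q : Int × List Int) : Int × PySem.Dict String Int :=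
  (q.1, PySem.Dict.mk [("first", PySem.List.minD q.2 (fun y => y) 0),
                       ("last", PySem.List.maxD q.2 (fun y => y) 0)])

lemma pv_fst_comp (k : Int) : ((fun p : Int × PySem.Dict String Int => p.1 == k) ∘ pvF)
    = (fun p : Int × List Int => p.1 == k) := by
  funext q; simp [pvF]

lemma pv_contains (g : PySem.Dict Int (List Int)) (inv : PySem.Dict Int (PySem.Dict String Int))
    (h : inv.items = g.items.map pvF) (k : Int) :
    inv.contains k = g.contains k := by
  simp only [PySem.Dict.contains, h, List.any_map, pv_fst_comp]

lemma pv_get? (g : PySem.Dict Int (List Int)) (inv : PySem.Dict Int (PySem.Dict String Int))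
    (h : inv.items = g.items.map pvF) (k : Int) :
    inv.get? k = (g.get? k).map (fun vs => PySem.Dict.mk
      [("first", PySem.List.minD vs (fun y => y) 0), ("last", PySem.List.maxD vs (fun y => y) 0)]) := by
  simp only [PySem.Dict.get?, h, List.find?_map, pv_fst_comp, Option.map_map]
  rfl

lemma pv_minD_append (a : Int) (t : List Int) (x : Int) :
    PySem.List.minD ((a :: t) ++ [x]) (fun y => y) 0
      = min (PySem.List.minD (a :: t) (fun y => y) 0) x := by
  simp [PySem.List.minD, PySem.List.min?_id_cons, List.foldl_append]

lemma pv_maxD_append (a : Int) (t : List Int) (x : Int) :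
    PySem.List.maxD ((a :: t) ++ [x]) (fun y => y) 0
      = max (PySem.List.maxD (a :: t) (fun y => y) 0) x := by
  simp [PySem.List.maxD, PySem.List.max?_id_cons, List.foldl_append]

-- one step of A's loop stays the pvF-image of one step of B's grouping loop
lemma pv_step (p : Int × List (String × Int))
    (g : PySem.Dict Int (List Int)) (inv : PySem.Dict Int (PySem.Dict String Int))
    (h : inv.items = g.items.map pvF)
    (hne : ∀ q ∈ g.items, q.2 ≠ []) :
    (let pi := (PySem.Dict.mk p.2).getD "pdf_page" 0
     if inv.contains pi = false then
       inv.insert pi (PySem.Dict.mk [("first", p.1), ("last", p.1)])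
     else
       let d := inv.getD pi (PySem.Dict.mk [])
       inv.insert pi ((d.insert "first" (min (d.getD "first" 0) p.1)).insert "last"
         (max (d.getD "last" 0) p.1))).items
    = (g.modify ((PySem.Dict.mk p.2).getD "pdf_page" 0) [] (fun l => l ++ [p.1])).items.map pvF := by
  set k := (PySem.Dict.mk p.2).getD "pdf_page" 0 with hk
  have hc := pv_contains g inv h k
  simp only [PySem.Dict.modify]
  by_cases hgc : g.contains k = true
  · -- pi already seen: A updates the inner dict in place, B appends to the group
    obtain ⟨vs, hvs⟩ : ∃ vs, g.get? k = some vs := by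
      have := PySem.Dict.contains_eq_isSome_get? (d := g) (k := k)
      rw [hgc] at this
      exact Option.isSome_iff_exists.mp this.symm
    obtain ⟨a, t, rfl⟩ : ∃ a t, vs = a :: t := by
      have hmem := PySem.Dict.mem_items_of_get?_eq_some g hvs
      have := hne _ hmem
      cases vs with
      | nil => simp at this
      | cons a t => exact ⟨a, t, rfl⟩
    have hgd : g.getD k [] = a :: t := PySem.Dict.getD_of_get?_eq_some g [] hvs
    have hic : inv.contains k = true := by rw [hc]; exact hgc
    have hinvd : inv.getD k (PySem.Dict.mk []) = PySem.Dict.mk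
        [("first", PySem.List.minD (a :: t) (fun y => y) 0), ("last", PySem.List.maxD (a :: t) (fun y => y) 0)] := by
      simp [PySem.Dict.getD, pv_get? g inv h k, hvs]
    simp only [hic, Bool.true_eq_false, if_false, hinvd, hgd]
    rw [PySem.Dict.items_insert_of_contains inv _ hic,
        PySem.Dict.items_insert_of_contains g _ hgc, h, List.map_map, List.map_map]
    apply List.map_congr_left
    intro q hq
    by_cases hqk : q.1 = k
    · simp only [Function.comp, pvF, hqk, beq_self_eq_true, if_true]
      rw [show (a :: t ++ [p.1]) = (a :: t) ++ [p.1] from rfl, pv_minD_append, pv_maxD_append]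
      simp [PySem.Dict.insert, PySem.Dict.contains, PySem.Dict.getD, PySem.Dict.get?, List.find?]
    · simp [Function.comp, pvF, hqk]
  · -- new pi: both sides append a fresh entry
    have hic : inv.contains k = false := by rw [hc]; simpa using hgc
    have hgd : g.getD k [] = [] := PySem.Dict.getD_of_not_contains g [] (by simpa using hgc)
    simp only [hic, if_true, hgd]
    rw [PySem.Dict.items_insert_of_not_contains inv _ hic,
        PySem.Dict.items_insert_of_not_contains g _ (by simpa using hgc), h, List.map_append]
    simp [pvF, PySem.List.minD, PySem.List.maxD, PySem.List.min?_id_cons, PySem.List.max?_id_cons]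

-- B's grouping loop never stores an empty group
lemma pv_hne (p : Int × List (String × Int)) (g : PySem.Dict Int (List Int))
    (hne : ∀ q ∈ g.items, q.2 ≠ []) :
    ∀ q ∈ (g.modify ((PySem.Dict.mk p.2).getD "pdf_page" 0) [] (fun l => l ++ [p.1])).items, q.2 ≠ [] := by
  intro q hq
  simp only [PySem.Dict.modify] at hq
  rcases (PySem.Dict.mem_items_insert _ _ _ _).mp hq with h1 | ⟨h2, _⟩
  · subst h1; simp
  · exact hne _ h2

-- main invariant: along the whole input, A's dict is the pvF-image of B's groups
lemma pv_main (L : List (Int × List (String × Int)))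
    (g : PySem.Dict Int (List Int)) (inv : PySem.Dict Int (PySem.Dict String Int))
    (h : inv.items = g.items.map pvF)
    (hne : ∀ q ∈ g.items, q.2 ≠ []) :
    (L.foldl
      (fun inv p =>
        let pi := (PySem.Dict.mk p.2).getD "pdf_page" 0
        if inv.contains pi = false then
          inv.insert pi (PySem.Dict.mk [("first", p.1), ("last", p.1)])
        else
          let d := inv.getD pi (PySem.Dict.mk [])
          inv.insert pi ((d.insert "first" (min (d.getD "first" 0) p.1)).insert "last"
            (max (d.getD "last" 0) p.1))) inv).items
    = (L.foldl
        (fun g p => g.modify ((PySem.Dict.mk p.2).getD "pdf_page" 0) [] (fun l => l ++ [p.1]))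
        g).items.map pvF := by
  induction L generalizing g inv with
  | nil => simpa using h
  | cons p L ih =>
    simp only [List.foldl_cons]
    exact ih _ _ (pv_step p g inv h hne) (pv_hne p g hne)

-- ===== VERDICT (by name: the statement is the Claim_ definition above) =====
theorem build_inverse_map_spec : Claim_equal_build_inverse_map := by
  intro pm _ _
  unfold Spec_build_inverse_map build_inverse_map build_inverse_map_alt
  rw [pv_main pm PySem.Dict.empty PySem.Dict.empty (by rfl) (by simp [PySem.Dict.empty])]
  simp [pvF, List.map_map, Function.comp]
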